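-- pv_equiv track=rewrite | github.com/daviddt369/hiddify-business-addon | panel-overlay/hiddifypanel/hutils/commercial_routing.py | _hiddify_json_ui_parse_domains_v2
-- ===== SOURCE A (Python) =====
-- def _hiddify_json_ui_parse_lines_v2(raw):
--     text = "" if raw is None else str(raw)
--     text = text.replace("\r\n", "\n").replace("\r", "\n")
--     text = text.replace(",", "\n").replace(";", "\n")
--
--     result = []
--     for line in text.split("\n"):
--         line = line.strip()
--         if not line or line.startswith("#"):
--             continue
--         if "#" in line:
--             line = line.split("#", 1)[0].strip()
--         if line and line not in result:
--             result.append(line)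
--     return result
--
-- def _hiddify_json_ui_parse_domains_v2(raw, defaults):
--     result = []
--
--     for item in _hiddify_json_ui_parse_lines_v2(raw):
--         item = item.strip().lower()
--         item = item.replace("https://", "").replace("http://", "")
--         item = item.split("/", 1)[0].strip()
--
--         if item.startswith("*."):
--             item = item[2:]
--
--         if item.startswith(("domain:", "full:", "regexp:", "geosite:")):
--             token = item
--         else:
--             token = "domain:" + item
--
--         if token not in result:
--             result.append(token)
--
--     if not result:
--         for item in defaults:
--             item = str(item).strip().lower().replace("domain:", "")
--             token = "domain:" + item
--             if token not in result:
--                 result.append(token)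
--
--     return result
-- ===== SOURCE B (Python) =====
-- # B: a character-level scanner replaces A's replace-chain + split (any of "\n\r,;"
-- # ends a segment; the extra empty segment a "\r\n" pair produces is dropped like any
-- # other blank line), all tokens are materialized in one comprehension-style pass with
-- # duplicates kept, and ordering dedup is done declaratively by first-occurrence index
-- # (t kept iff absent from tokens[:i]); no incremental result list, no line-level dedup.
--
-- def _hiddify_json_ui_token_v2(seg):
--     seg = seg.strip()
--     if not seg or seg.startswith("#"):
--         return None
--     if "#" in seg:
--         seg = seg.split("#", 1)[0].strip()
--     if not seg:
--         return None
--     item = seg.strip().lower()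
--     item = item.replace("https://", "").replace("http://", "")
--     item = item.split("/", 1)[0].strip()
--     if item.startswith("*."):
--         item = item[2:]
--     if item.startswith(("domain:", "full:", "regexp:", "geosite:")):
--         return item
--     return "domain:" + item
--
--
-- def _hiddify_json_ui_first_occurrences(xs):
--     return [x for i, x in enumerate(xs) if x not in xs[:i]]
--
--
-- def _hiddify_json_ui_parse_domains_v2(raw, defaults):
--     text = "" if raw is None else str(raw)
--
--     segments = []
--     buf = []
--     for ch in text:
--         if ch in "\n\r,;":
--             segments.append("".join(buf))
--             buf = []
--         else:
--             buf.append(ch)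
--     segments.append("".join(buf))
--
--     tokens = [t for t in (_hiddify_json_ui_token_v2(s) for s in segments)
--               if t is not None]
--     result = _hiddify_json_ui_first_occurrences(tokens)
--     if result:
--         return result
--
--     dts = ["domain:" + str(d).strip().lower().replace("domain:", "")
--            for d in defaults]
--     return _hiddify_json_ui_first_occurrences(dts)
-- ===== Notes on version B (the rewrite author's own statement) =====
-- stated objective: alternative
-- what changed: B replaces A's replace-chain-then-split normalization and its two incremental dedup loops by a character-level scanner that cuts segments at any of \n \r , ; (the empty segment a \r\n pair yields is dropped like any blank line), one pass materializing every token (duplicates kept, each segment mapped straight to its final token, subsuming A's line-level dedup), and a declarative first-occurrence-index dedup (keep tokens[i] iff it is absent from tokens[:i]) used for both the main list and the defaults fallback.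
import Mathlib
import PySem

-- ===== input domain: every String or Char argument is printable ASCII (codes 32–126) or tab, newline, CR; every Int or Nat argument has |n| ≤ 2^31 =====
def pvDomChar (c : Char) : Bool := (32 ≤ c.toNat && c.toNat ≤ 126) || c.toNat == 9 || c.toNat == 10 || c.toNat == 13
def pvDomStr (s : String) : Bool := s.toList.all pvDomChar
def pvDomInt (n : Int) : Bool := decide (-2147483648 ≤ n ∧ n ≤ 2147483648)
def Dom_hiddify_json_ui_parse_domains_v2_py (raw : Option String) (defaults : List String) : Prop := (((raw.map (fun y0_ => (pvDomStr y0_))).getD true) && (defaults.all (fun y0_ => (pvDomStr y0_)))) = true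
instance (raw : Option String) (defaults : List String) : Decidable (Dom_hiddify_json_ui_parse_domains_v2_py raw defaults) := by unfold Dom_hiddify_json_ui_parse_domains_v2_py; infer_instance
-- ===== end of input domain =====

-- B replaces A's replace-chain+split and its two incremental dedup loops by a character-level
-- scanner, one token-materializing pass, and a declarative first-occurrence-index dedup.

-- ===== PORT A =====
-- helper: A's `_hiddify_json_ui_parse_lines_v2` (split(sep) / split(sep,1) with nonempty sep never raise: `.getD []`; its `[0]` is taken with headD "", the split is never empty)
def pvLinesA (raw : Option String) : List String :=
  let text := raw.getD ""
  let text := PySem.Str.replace (PySem.Str.replace text "\r\n" "\n") "\r" "\n"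
  let text := PySem.Str.replace (PySem.Str.replace text "," "\n") ";" "\n"
  ((PySem.Str.split? text "\n").getD []).foldl (fun result line =>
    let line := PySem.Str.strip line
    if line == "" || PySem.Str.startswith line "#" then result
    else
      let line := if PySem.Str.isIn "#" line then
          PySem.Str.strip (((PySem.Str.splitMax? line "#" 1).getD []).headD "")
        else line
      if !(line == "") && !(result.contains line) then result ++ [line] else result) []

def hiddify_json_ui_parse_domains_v2_py (raw : Option String) (defaults : List String) : List String :=
  let result := (pvLinesA raw).foldl (fun result item =>
    let item := PySem.Str.lower (PySem.Str.strip item)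
    let item := PySem.Str.replace (PySem.Str.replace item "https://" "") "http://" ""
    let item := PySem.Str.strip (((PySem.Str.splitMax? item "/" 1).getD []).headD "")
    let item := if PySem.Str.startswith item "*." then PySem.Str.slice item (some 2) none else item
    let token := if PySem.Str.startswith item "domain:" || PySem.Str.startswith item "full:" ||
        PySem.Str.startswith item "regexp:" || PySem.Str.startswith item "geosite:" then item
      else "domain:" ++ item
    if result.contains token then result else result ++ [token]) []
  if result == [] then
    defaults.foldl (fun result item =>
      let item := PySem.Str.replace (PySem.Str.lower (PySem.Str.strip item)) "domain:" ""
      let token := "domain:" ++ item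
      if result.contains token then result else result ++ [token]) result
  else result

-- ===== PORT B =====
-- helper: B's `_hiddify_json_ui_token_v2` (None = Option.none)
def pvTokenOptB (seg : String) : Option String :=
  let seg := PySem.Str.strip seg
  if seg == "" || PySem.Str.startswith seg "#" then none
  else
    let seg := if PySem.Str.isIn "#" seg then
        PySem.Str.strip (((PySem.Str.splitMax? seg "#" 1).getD []).headD "")
      else seg
    if seg == "" then none
    else
      let item := PySem.Str.lower (PySem.Str.strip seg)
      let item := PySem.Str.replace (PySem.Str.replace item "https://" "") "http://" ""
      let item := PySem.Str.strip (((PySem.Str.splitMax? item "/" 1).getD []).headD "")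
      let item := if PySem.Str.startswith item "*." then PySem.Str.slice item (some 2) none else item
      some (if PySem.Str.startswith item "domain:" || PySem.Str.startswith item "full:" ||
          PySem.Str.startswith item "regexp:" || PySem.Str.startswith item "geosite:" then item
        else "domain:" ++ item)

-- helper: B's `_hiddify_json_ui_first_occurrences` ([x for i, x in enumerate(xs) if x not in xs[:i]])
def pvFirstOcc (xs : List String) : List String :=
  ((PySem.List.enumerate xs).filter
    (fun p => !((PySem.List.slice xs none (some p.1)).contains p.2))).map Prod.snd

def hiddify_json_ui_parse_domains_v2_py_alt (raw : Option String) (defaults : List String) : List String :=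
  let text := raw.getD ""
  -- character scanner: any of \n \r , ; ends the current segment ("".join(buf))
  let ss := text.toList.foldl (fun (p : List String × List Char) ch =>
      if ch == '\n' || ch == '\r' || ch == ',' || ch == ';' then (p.1 ++ [String.ofList p.2], [])
      else (p.1, p.2 ++ [ch])) (([], []) : List String × List Char)
  let segments := ss.1 ++ [String.ofList ss.2]
  let tokens := segments.filterMap pvTokenOptB
  let result := pvFirstOcc tokens
  if result ≠ [] then result
  else pvFirstOcc (defaults.map (fun d =>
    "domain:" ++ PySem.Str.replace (PySem.Str.lower (PySem.Str.strip d)) "domain:" ""))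

-- ===== PRECONDITION & SPEC =====
def Spec_hiddify_json_ui_parse_domains_v2_py (raw : Option String) (defaults : List String) (out : List String) : Prop := out = hiddify_json_ui_parse_domains_v2_py_alt raw defaults
instance (raw : Option String) (defaults : List String) (out : List String) : Decidable (Spec_hiddify_json_ui_parse_domains_v2_py raw defaults out) := by unfold Spec_hiddify_json_ui_parse_domains_v2_py; infer_instance

-- ===== CLAIM (what is proved, stated in full; the proofs are below) =====
def Claim_equal_hiddify_json_ui_parse_domains_v2_py : Prop := ∀ (raw : Option String) (defaults : List String), Dom_hiddify_json_ui_parse_domains_v2_py raw defaults → Spec_hiddify_json_ui_parse_domains_v2_py raw defaults (hiddify_json_ui_parse_domains_v2_py raw defaults)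

-- ===== LEMMAS AND PROOFS =====

-- ---- A decomposed: clean / token / dedup fold helpers (proof layer only) ----
def pvCleanB (line : String) : Option String :=
  let line := PySem.Str.strip line
  if line == "" || PySem.Str.startswith line "#" then none
  else
    let line := if PySem.Str.isIn "#" line then
        PySem.Str.strip (((PySem.Str.splitMax? line "#" 1).getD []).headD "")
      else line
    if line == "" then none else some line

def pvTokenB (item : String) : String :=
  let item := PySem.Str.lower (PySem.Str.strip item)
  let item := PySem.Str.replace (PySem.Str.replace item "https://" "") "http://" ""
  let item := PySem.Str.strip (((PySem.Str.splitMax? item "/" 1).getD []).headD "")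
  let item := if PySem.Str.startswith item "*." then PySem.Str.slice item (some 2) none else item
  if PySem.Str.startswith item "domain:" || PySem.Str.startswith item "full:" ||
      PySem.Str.startswith item "regexp:" || PySem.Str.startswith item "geosite:" then item
  else "domain:" ++ item

-- B's fused per-segment function is clean-then-token
theorem pvTokenOptB_eq (s : String) : pvTokenOptB s = (pvCleanB s).map pvTokenB := by
  unfold pvTokenOptB pvCleanB pvTokenB
  dsimp only
  split_ifs <;> simp_all

-- token-dedup append step
def pvAddT (acc : List String) (t : String) : List String :=
  if acc.contains t then acc else acc ++ [t]

-- token fold over a list of cleaned lines (A's second phase)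
def pvTk (acc : List String) (xs : List String) : List String :=
  xs.foldl (fun a s => pvAddT a (pvTokenB s)) acc

-- line-dedup fold (A's first phase, after filterMap pvCleanB)
def pvDd (acc : List String) (xs : List String) : List String :=
  xs.foldl (fun a x => if a.contains x then a else a ++ [x]) acc

-- intermediate machine: dedup lines and emit tokens simultaneously
def pvT3 (acc : List String) (D : List String) : List String → List String
  | [] => acc
  | x :: tl =>
      if D.contains x then pvT3 acc D tl
      else pvT3 (pvAddT acc (pvTokenB x)) (D ++ [x]) tl

-- skip-or-step combinator (shared shape of the matches below)
def pvMatchStep {α β γ : Type} (f : α → Option β) (g : γ → β → γ) (a : γ) (x : α) : γ :=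
  match f x with | none => a | some y => g a y

theorem pv_foldl_match_filterMap {α β γ : Type} (f : α → Option β) (g : γ → β → γ) :
    ∀ (xs : List α) (acc : γ),
      xs.foldl (pvMatchStep f g) acc = (xs.filterMap f).foldl g acc := by
  intro xs
  induction xs with
  | nil => intro acc; rfl
  | cons x tl ih =>
    intro acc
    cases h : f x <;> simp [pvMatchStep, h, ih]

-- A's two phases equal the fused machine
theorem pvLA : ∀ (xs D : List String),
    pvTk [] (pvDd D xs) = pvT3 (pvTk [] D) D xs := by
  intro xs
  induction xs with
  | nil => intro D; rfl
  | cons x tl ih =>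
    intro D
    have hdd : pvDd D (x :: tl) = pvDd (if D.contains x then D else D ++ [x]) tl := rfl
    cases hc : D.contains x with
    | true =>
      have hx : x ∈ D := by simpa using hc
      rw [hdd, hc, if_pos rfl]
      simpa [pvT3, hc, hx] using ih D
    | false =>
      have hx : x ∉ D := by simpa using hc
      rw [hdd, hc, if_neg (by simp)]
      have htk : pvTk [] (D ++ [x]) = pvAddT (pvTk [] D) (pvTokenB x) := by
        simp [pvTk, List.foldl_append]
      simpa [pvT3, hc, hx, htk] using ih (D ++ [x])

-- the first-phase dedup is subsumed by the token dedup
theorem pvLB : ∀ (xs D acc : List String),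
    (∀ d, d ∈ D → (pvTokenB d) ∈ acc) →
    pvT3 acc D xs = pvTk acc xs := by
  intro xs
  induction xs with
  | nil => intro D acc _; rfl
  | cons x tl ih =>
    intro D acc hinv
    have hT : pvTk acc (x :: tl) = pvTk (pvAddT acc (pvTokenB x)) tl := rfl
    cases hc : D.contains x with
    | true =>
      have hx : x ∈ D := by simpa using hc
      have hmem : (pvTokenB x) ∈ acc := hinv x hx
      have hstep : pvAddT acc (pvTokenB x) = acc := by simp [pvAddT, hmem]
      have h1 : pvT3 acc D (x :: tl) = pvT3 acc D tl := by simp [pvT3, hx]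
      rw [h1, hT, hstep]
      exact ih D acc hinv
    | false =>
      have hx : x ∉ D := by simpa using hc
      have h1 : pvT3 acc D (x :: tl) = pvT3 (pvAddT acc (pvTokenB x)) (D ++ [x]) tl := by
        simp [pvT3, hx]
      rw [h1, hT]
      refine ih (D ++ [x]) (pvAddT acc (pvTokenB x)) ?_
      intro d hd
      rcases List.mem_append.mp hd with hd | hd
      · have := hinv d hd
        simp [pvAddT]; split <;> simp_all
      · have : d = x := by simpa using hd
        subst this
        simp [pvAddT]; split <;> simp_all

-- A's line-loop body equals the match-on-pvCleanB dedup body, pointwise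
theorem pvA_line_body (result : List String) (line : String) :
    (let line := PySem.Str.strip line
     if line == "" || PySem.Str.startswith line "#" then result
     else
       let line := if PySem.Str.isIn "#" line then
           PySem.Str.strip (((PySem.Str.splitMax? line "#" 1).getD []).headD "")
         else line
       if !(line == "") && !(result.contains line) then result ++ [line] else result)
    = pvMatchStep pvCleanB
        (fun a s => if a.contains s then a else a ++ [s]) result line := by
  unfold pvCleanB pvMatchStep
  dsimp only
  split_ifs <;> simp_all

-- A's first phase, over any line list, as a filterMap dedup fold
theorem pvA_lines_eq (ls : List String) :
    ls.foldl (fun result line =>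
      let line := PySem.Str.strip line
      if line == "" || PySem.Str.startswith line "#" then result
      else
        let line := if PySem.Str.isIn "#" line then
            PySem.Str.strip (((PySem.Str.splitMax? line "#" 1).getD []).headD "")
          else line
        if !(line == "") && !(result.contains line) then result ++ [line] else result) []
    = pvDd [] (ls.filterMap pvCleanB) := by
  have hbody : (fun (result : List String) (line : String) =>
      let line := PySem.Str.strip line
      if line == "" || PySem.Str.startswith line "#" then result
      else
        let line := if PySem.Str.isIn "#" line then
            PySem.Str.strip (((PySem.Str.splitMax? line "#" 1).getD []).headD "")
          else line
        if !(line == "") && !(result.contains line) then result ++ [line] else result)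
      = pvMatchStep pvCleanB (fun a s => if a.contains s then a else a ++ [s]) :=
    funext fun r => funext fun l => pvA_line_body r l
  rw [hbody]
  rw [pv_foldl_match_filterMap pvCleanB
    (fun a x => if a.contains x then a else a ++ [x]) ls []]
  rfl

-- A's second phase, over any line list, is pvTk
theorem pvA_tok_eq (ls : List String) :
    ls.foldl (fun result item =>
      let item := PySem.Str.lower (PySem.Str.strip item)
      let item := PySem.Str.replace (PySem.Str.replace item "https://" "") "http://" ""
      let item := PySem.Str.strip (((PySem.Str.splitMax? item "/" 1).getD []).headD "")
      let item := if PySem.Str.startswith item "*." then PySem.Str.slice item (some 2) none else item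
      let token := if PySem.Str.startswith item "domain:" || PySem.Str.startswith item "full:" ||
          PySem.Str.startswith item "regexp:" || PySem.Str.startswith item "geosite:" then item
        else "domain:" ++ item
      if result.contains token then result else result ++ [token]) []
    = pvTk [] ls := rfl

-- deduping the lines first does not change the token fold
theorem pvTk_dedup (ls : List String) : pvTk [] (pvDd [] ls) = pvTk [] ls := by
  rw [pvLA ls []]
  exact pvLB ls [] [] (by intro d hd; simp at hd)

-- ---- first-occurrence dedup: the fold equals B's declarative filter ----

-- pvFirstOcc generalized with a processed prefix
def pvPff (pre xs : List String) : List String :=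
  ((PySem.List.enumerate xs (pre.length : Int)).filter
    (fun p => !((PySem.List.slice (pre ++ xs) none (some p.1)).contains p.2))).map Prod.snd

theorem pvPff_nil (pre : List String) : pvPff pre [] = [] := rfl

theorem pvSlice_take (l : List String) (n : Nat) :
    PySem.List.slice l none (some (n : Int)) = l.take n := by
  rw [PySem.List.slice_to l (by positivity)]
  simp

theorem pvPff_cons (pre : List String) (x : String) (xs : List String) :
    pvPff pre (x :: xs)
      = (if pre.contains x then [] else [x]) ++ pvPff (pre ++ [x]) xs := by
  unfold pvPff
  have he : PySem.List.enumerate (x :: xs) (pre.length : Int)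
      = ((pre.length : Int), x) :: PySem.List.enumerate xs ((pre.length : Int) + 1) := rfl
  rw [he]
  rw [List.filter_cons]
  have hsl : PySem.List.slice (pre ++ x :: xs) none (some ((pre.length : Int))) = pre := by
    rw [pvSlice_take]
    exact List.take_left
  have hlen : ((pre.length : Int) + 1) = (((pre ++ [x]).length : Nat) : Int) := by
    simp
  have happ : pre ++ x :: xs = (pre ++ [x]) ++ xs := by simp
  rw [hsl, hlen, happ]
  cases hc : pre.contains x with
  | true => simp
  | false => simp

theorem pv_foldl_addT_pff : ∀ (xs pre acc : List String),
    (∀ a, a ∈ acc ↔ a ∈ pre) →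
    xs.foldl pvAddT acc = acc ++ pvPff pre xs := by
  intro xs
  induction xs with
  | nil => intro pre acc _; simp [pvPff_nil]
  | cons x tl ih =>
    intro pre acc hm
    rw [pvPff_cons]
    cases hc : pre.contains x with
    | true =>
      have hx : x ∈ acc := (hm x).2 (by simpa using hc)
      have : pvAddT acc x = acc := by simp [pvAddT, hx]
      simp only [List.foldl_cons, this]
      rw [ih (pre ++ [x]) acc ?_]
      · simp
      · intro a
        rw [hm a]
        constructor
        · intro h; exact List.mem_append.mpr (Or.inl h)
        · intro h
          rcases List.mem_append.mp h with h | h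
          · exact h
          · simp at h; subst h; simpa using hc
    | false =>
      have hx : x ∉ acc := fun h => by simp [(hm x).1 h] at hc
      have : pvAddT acc x = acc ++ [x] := by simp [pvAddT, hx]
      simp only [List.foldl_cons, this]
      rw [ih (pre ++ [x]) (acc ++ [x]) (by intro a; simp [hm a])]
      simp

theorem pv_firstOcc_eq_fold (xs : List String) :
    xs.foldl pvAddT [] = pvFirstOcc xs := by
  have h := pv_foldl_addT_pff xs [] [] (by simp)
  simpa [pvPff, pvFirstOcc] using h

-- ---- segment lists: A's replace-chain + split vs B's character scanner ----

def pvIsSep (c : Char) : Bool := c == '\n' || c == '\r' || c == ',' || c == ';'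

-- split a char list at every char satisfying p (Python's str.split shape)
def pvSplitP (p : Char → Bool) : List Char → List (List Char)
  | [] => [[]]
  | c :: t => if p c then [] :: pvSplitP p t else (pvSplitP p t).modifyHead (c :: ·)

-- delete the '\r' of every "\r\n" pair (what replace("\r\n","\n") does)
def pvRDel : List Char → List Char
  | [] => []
  | [c] => [c]
  | c :: d :: t => if c = '\r' ∧ d = '\n' then '\n' :: pvRDel t else c :: pvRDel (d :: t)

theorem pvSplitP_ne_nil (p : Char → Bool) (cs : List Char) : pvSplitP p cs ≠ [] := by
  cases cs with
  | nil => simp [pvSplitP]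
  | cons c t =>
    simp only [pvSplitP]
    split
    · simp
    · cases h : pvSplitP p t with
      | nil => exact absurd h (pvSplitP_ne_nil p t)
      | cons a l => simp

-- replace with a single-char pattern is a map
theorem pvReplace_go_single (o n : Char) :
    ∀ (fuel : Nat) (l acc : List Char), l.length ≤ fuel →
      PySem.Chars.replace.go [o] [n] fuel l acc
        = acc.reverse ++ l.map (fun c => if c == o then n else c) := by
  intro fuel
  induction fuel with
  | zero =>
    intro l acc h
    have : l = [] := List.eq_nil_of_length_eq_zero (Nat.le_zero.mp h)
    subst this
    simp [PySem.Chars.replace.go]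
  | succ f ih =>
    intro l acc h
    cases l with
    | nil => simp [PySem.Chars.replace.go]
    | cons c t =>
      rw [PySem.Chars.replace.go]
      by_cases hp : List.isPrefixOf [o] (c :: t) = true
      · have hco : c = o := by
          simp [List.isPrefixOf] at hp; exact hp.symm
        rw [if_pos hp]
        rw [show List.drop [o].length (c :: t) = t from rfl]
        rw [ih t ([n].reverse ++ acc) (by simp at h; omega)]
        subst hco
        simp
      · rw [if_neg hp]
        have hco : (c == o) = false := by
          simp [List.isPrefixOf] at hp ⊢
          exact fun e => hp e.symm
        rw [ih t (c :: acc) (by simp at h; omega)]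
        simp
        exact fun e => absurd e (by simpa using hco)

-- replace "\r\n" -> "\n" is pvRDel
theorem pvReplace_go_rn :
    ∀ (fuel : Nat) (l acc : List Char), l.length ≤ fuel →
      PySem.Chars.replace.go ['\r', '\n'] ['\n'] fuel l acc = acc.reverse ++ pvRDel l := by
  intro fuel
  induction fuel with
  | zero =>
    intro l acc h
    have : l = [] := List.eq_nil_of_length_eq_zero (Nat.le_zero.mp h)
    subst this
    simp [PySem.Chars.replace.go, pvRDel]
  | succ f ih =>
    intro l acc h
    cases l with
    | nil => simp [PySem.Chars.replace.go, pvRDel]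
    | cons c t =>
      rw [PySem.Chars.replace.go]
      cases t with
      | nil =>
        have hp : List.isPrefixOf ['\r', '\n'] [c] = false := by
          simp [List.isPrefixOf]
        rw [if_neg (by simp [hp])]
        rw [ih [] (c :: acc) (by simp)]
        simp [pvRDel]
      | cons d t' =>
        by_cases hp : List.isPrefixOf ['\r', '\n'] (c :: d :: t') = true
        · have hcd : c = '\r' ∧ d = '\n' := by
            simp [List.isPrefixOf] at hp
            exact ⟨hp.1.symm, hp.2.symm⟩
          rw [if_pos hp]
          rw [show List.drop (['\r', '\n'].length) (c :: d :: t') = t' from rfl]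
          rw [ih t' (['\n'].reverse ++ acc) (by simp at h ⊢; omega)]
          rw [pvRDel, if_pos hcd]
          simp
        · have hcd : ¬(c = '\r' ∧ d = '\n') := by
            simp [List.isPrefixOf] at hp
            intro hc
            exact hp hc.1.symm hc.2.symm
          rw [if_neg hp]
          rw [ih (d :: t') (c :: acc) (by simp at h ⊢; omega)]
          rw [pvRDel, if_neg hcd]
          simp

theorem pvReplace_single (s : List Char) (o n : Char) :
    PySem.Chars.replace s [o] [n] = s.map (fun c => if c == o then n else c) := by
  unfold PySem.Chars.replace
  simpa using pvReplace_go_single o n s.length s [] le_rfl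

theorem pvReplace_rn (s : List Char) :
    PySem.Chars.replace s ['\r', '\n'] ['\n'] = pvRDel s := by
  unfold PySem.Chars.replace
  simpa using pvReplace_go_rn s.length s [] le_rfl

-- splitOn on "\n" is pvSplitP (· == '\n')
theorem pvSplitOn_nl_go :
    ∀ (fuel : Nat) (l cur : List Char) (acc : List (List Char)), l.length ≤ fuel →
      PySem.Chars.splitOn.go ['\n'] fuel l cur acc
        = acc.reverse ++ (pvSplitP (· == '\n') l).modifyHead (cur.reverse ++ ·) := by
  intro fuel
  induction fuel with
  | zero =>
    intro l cur acc h
    have : l = [] := List.eq_nil_of_length_eq_zero (Nat.le_zero.mp h)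
    subst this
    simp [PySem.Chars.splitOn.go, pvSplitP]
  | succ f ih =>
    intro l cur acc h
    cases l with
    | nil => simp [PySem.Chars.splitOn.go, pvSplitP]
    | cons c t =>
      rw [PySem.Chars.splitOn.go]
      by_cases hp : List.isPrefixOf ['\n'] (c :: t) = true
      · have hc : c = '\n' := by simp [List.isPrefixOf] at hp; exact hp.symm
        rw [if_pos hp]
        rw [show List.drop (['\n'].length) (c :: t) = t from rfl]
        rw [ih t [] (cur.reverse :: acc) (by simp at h ⊢; omega)]
        rw [pvSplitP, if_pos (by simp [hc])]
        cases hs : pvSplitP (· == '\n') t with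
        | nil => exact absurd hs (pvSplitP_ne_nil _ t)
        | cons a l' => simp
      · have hc : (c == '\n') = false := by
          simp [List.isPrefixOf] at hp ⊢
          exact fun e => hp e.symm
        rw [if_neg hp]
        rw [ih t (c :: cur) acc (by simp at h ⊢; omega)]
        rw [pvSplitP, if_neg (by simp [hc])]
        cases hs : pvSplitP (· == '\n') t with
        | nil => exact absurd hs (pvSplitP_ne_nil _ t)
        | cons a l' => simp

theorem pvSplitOn_nl (s : List Char) :
    PySem.Chars.splitOn s ['\n'] = pvSplitP (· == '\n') s := by
  unfold PySem.Chars.splitOn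
  have h := pvSplitOn_nl_go (s.length + 1) s [] [] (by omega)
  rw [h]
  simp only [List.reverse_nil, List.nil_append]
  cases hsp : pvSplitP (fun x => x == '\n') s with
  | nil => rfl
  | cons a l => simp

-- mapping every separator char to '\n' turns the \n-split into the any-separator split
theorem pvSplitP_map_sigma (ds : List Char) :
    pvSplitP (· == '\n') (ds.map (fun c => if c == '\r' || c == ',' || c == ';' then '\n' else c))
      = pvSplitP pvIsSep ds := by
  induction ds with
  | nil => rfl
  | cons c t ih =>
    simp only [List.map_cons]
    by_cases hs : pvIsSep c = true
    · have h1 : ((if c == '\r' || c == ',' || c == ';' then '\n' else c) == '\n') = true := by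
        simp [pvIsSep] at hs
        rcases hs with ((h | h) | h) | h <;> subst h <;> simp
      rw [pvSplitP, if_pos h1, pvSplitP, if_pos hs, ih]
    · have hne : (c == '\r' || c == ',' || c == ';') = false := by
        simp [pvIsSep] at hs
        simp [hs]
      have hcn : ¬ c = '\n' := by simp [pvIsSep] at hs; tauto
      have h1 : ((if c == '\r' || c == ',' || c == ';' then '\n' else c) == '\n') = false := by
        rw [if_neg (by simp [hne])]
        exact beq_eq_false_iff_ne.mpr hcn
      rw [pvSplitP, if_neg (by rw [h1]; simp), pvSplitP, if_neg hs, ih, hne]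
      simp

theorem pvFilter_peel {h1 h2 : List Char} {t1 t2 : List (List Char)}
    (hh : h1 = h2) (hf : (h1 :: t1).filter (· ≠ []) = (h2 :: t2).filter (· ≠ []))
    : t1.filter (· ≠ []) = t2.filter (· ≠ []) := by
  subst hh
  by_cases he : h1 = []
  · simpa [he] using hf
  · simpa [he] using hf

-- deleting the '\r' of a "\r\n" only removes an empty segment
theorem pvSplitP_rDel (cs : List Char) :
    (pvSplitP pvIsSep (pvRDel cs)).headI = (pvSplitP pvIsSep cs).headI ∧
    (pvSplitP pvIsSep (pvRDel cs)).filter (· ≠ []) = (pvSplitP pvIsSep cs).filter (· ≠ []) := by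
  induction cs using pvRDel.induct with
  | case1 => exact ⟨rfl, rfl⟩
  | case2 c => exact ⟨rfl, rfl⟩
  | case3 c d t hcd ih =>
    obtain ⟨hc, hd⟩ := hcd
    subst hc; subst hd
    rw [show pvRDel ('\r' :: '\n' :: t) = '\n' :: pvRDel t from by rw [pvRDel]; simp]
    rw [show pvSplitP pvIsSep ('\n' :: pvRDel t) = [] :: pvSplitP pvIsSep (pvRDel t) from by
      rw [pvSplitP]; simp [pvIsSep]]
    rw [show pvSplitP pvIsSep ('\r' :: '\n' :: t) = [] :: [] :: pvSplitP pvIsSep t from by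
      rw [pvSplitP, pvSplitP]; simp [pvIsSep]]
    refine ⟨rfl, ?_⟩
    simpa using ih.2
  | case4 c d t hcd ih =>
    rw [show pvRDel (c :: d :: t) = c :: pvRDel (d :: t) from by rw [pvRDel, if_neg hcd]]
    by_cases hs : pvIsSep c = true
    · rw [show pvSplitP pvIsSep (c :: pvRDel (d :: t)) = [] :: pvSplitP pvIsSep (pvRDel (d :: t)) from by
        rw [pvSplitP, if_pos hs]]
      rw [show pvSplitP pvIsSep (c :: d :: t) = [] :: pvSplitP pvIsSep (d :: t) from by
        rw [pvSplitP, if_pos hs]]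
      refine ⟨rfl, ?_⟩
      simpa using ih.2
    · rw [show pvSplitP pvIsSep (c :: pvRDel (d :: t))
          = (pvSplitP pvIsSep (pvRDel (d :: t))).modifyHead (c :: ·) from by
        rw [pvSplitP, if_neg hs]]
      rw [show pvSplitP pvIsSep (c :: d :: t)
          = (pvSplitP pvIsSep (d :: t)).modifyHead (c :: ·) from by
        rw [pvSplitP, if_neg hs]]
      cases h1 : pvSplitP pvIsSep (pvRDel (d :: t)) with
      | nil => exact absurd h1 (pvSplitP_ne_nil _ _)
      | cons a1 l1 =>
        cases h2 : pvSplitP pvIsSep (d :: t) with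
        | nil => exact absurd h2 (pvSplitP_ne_nil _ _)
        | cons a2 l2 =>
          have hh : a1 = a2 := by
            have := ih.1; rw [h1, h2] at this; simpa using this
          have hlf : l1.filter (· ≠ []) = l2.filter (· ≠ []) := by
            have := ih.2; rw [h1, h2] at this
            exact pvFilter_peel hh this
          subst hh
          refine ⟨by simp [List.modifyHead], ?_⟩
          simp only [List.modifyHead, List.filter_cons]
          have : (decide ¬(c :: a1) = []) = true := by simp
          simp only [this]
          simpa using hlf

-- B's scanner fold computes the pvIsSep split
theorem pvScanner (cs : List Char) :
    ∀ (segs : List String) (buf : List Char),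
      (let r := cs.foldl (fun (p : List String × List Char) ch =>
          if ch == '\n' || ch == '\r' || ch == ',' || ch == ';' then (p.1 ++ [String.ofList p.2], [])
          else (p.1, p.2 ++ [ch])) (segs, buf)
       r.1 ++ [String.ofList r.2])
      = segs ++ ((pvSplitP pvIsSep cs).modifyHead (buf ++ ·)).map String.ofList := by
  induction cs with
  | nil => intro segs buf; simp [pvSplitP]
  | cons c t ih =>
    intro segs buf
    by_cases hs : (c == '\n' || c == '\r' || c == ',' || c == ';') = true
    · simp only [List.foldl_cons, if_pos hs]
      rw [ih (segs ++ [String.ofList buf]) []]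
      rw [show pvSplitP pvIsSep (c :: t) = [] :: pvSplitP pvIsSep t from by
        rw [pvSplitP, if_pos (by simpa [pvIsSep] using hs)]]
      cases h1 : pvSplitP pvIsSep t with
      | nil => exact absurd h1 (pvSplitP_ne_nil _ _)
      | cons a l => simp
    · simp only [List.foldl_cons, if_neg hs]
      rw [ih segs (buf ++ [c])]
      rw [show pvSplitP pvIsSep (c :: t) = (pvSplitP pvIsSep t).modifyHead (c :: ·) from by
        rw [pvSplitP, if_neg (by simpa [pvIsSep] using hs)]]
      cases h1 : pvSplitP pvIsSep t with
      | nil => exact absurd h1 (pvSplitP_ne_nil _ _)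
      | cons a l => simp

-- dropping segments that map to none lets us compare through filter (· ≠ [])
theorem pvFilterMap_filter_ne_nil (g : List Char → Option String)
    (hg : g [] = none) (l : List (List Char)) :
    l.filterMap g = (l.filter (· ≠ [])).filterMap g := by
  induction l with
  | nil => rfl
  | cons x t ih =>
    by_cases hx : x = []
    · subst hx; simp [hg, ih]
    · simp [hx, List.filterMap_cons, ih]

-- three single-char replaces compose to one map sending every remaining separator to '\n'
theorem pvMapChain (ds : List Char) :
    ((ds.map (fun c => if c == '\r' then '\n' else c)).map
        (fun c => if c == ',' then '\n' else c)).map (fun c => if c == ';' then '\n' else c)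
      = ds.map (fun c => if c == '\r' || c == ',' || c == ';' then '\n' else c) := by
  simp only [List.map_map]
  apply List.map_congr_left
  intro c _
  simp only [Function.comp]
  split_ifs <;> simp_all

-- A's line list is the any-separator split of the raw text with "\r\n" pairs collapsed
theorem pvLinesA_eq_split (text : String) :
    ((PySem.Str.split? (PySem.Str.replace (PySem.Str.replace (PySem.Str.replace
        (PySem.Str.replace text "\r\n" "\n") "\r" "\n") "," "\n") ";" "\n") "\n").getD [])
      = (pvSplitP pvIsSep (pvRDel text.toList)).map String.ofList := by
  have hrn : ("\r\n" : String).toList = ['\r', '\n'] := by decide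
  have hr : ("\r" : String).toList = ['\r'] := by decide
  have hn : ("\n" : String).toList = ['\n'] := by decide
  have hc : ("," : String).toList = [','] := by decide
  have hsc : (";" : String).toList = [';'] := by decide
  have h1 : (PySem.Str.replace (PySem.Str.replace (PySem.Str.replace
        (PySem.Str.replace text "\r\n" "\n") "\r" "\n") "," "\n") ";" "\n").toList
      = (pvRDel text.toList).map (fun c => if c == '\r' || c == ',' || c == ';' then '\n' else c) := by
    rw [PySem.Str.toList_replace, PySem.Str.toList_replace, PySem.Str.toList_replace,
      PySem.Str.toList_replace]
    rw [hrn, hr, hn, hc, hsc]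
    rw [pvReplace_rn, pvReplace_single, pvReplace_single, pvReplace_single, pvMapChain]
  unfold PySem.Str.split?
  rw [hn, h1]
  rw [show PySem.Chars.split? ((pvRDel text.toList).map
      (fun c => if c == '\r' || c == ',' || c == ';' then '\n' else c)) ['\n']
    = some (PySem.Chars.splitOn ((pvRDel text.toList).map
      (fun c => if c == '\r' || c == ',' || c == ';' then '\n' else c)) ['\n']) from by
    simp [PySem.Chars.split?]]
  rw [pvSplitOn_nl, pvSplitP_map_sigma]
  rfl

-- B's segment list is the any-separator split of the raw text
theorem pvSegsB_eq_split (text : String) :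
    (let r := text.toList.foldl (fun (p : List String × List Char) ch =>
        if ch == '\n' || ch == '\r' || ch == ',' || ch == ';' then (p.1 ++ [String.ofList p.2], [])
        else (p.1, p.2 ++ [ch])) (([], []) : List String × List Char)
     r.1 ++ [String.ofList r.2])
      = (pvSplitP pvIsSep text.toList).map String.ofList := by
  rw [pvScanner text.toList [] []]
  cases h : pvSplitP pvIsSep text.toList with
  | nil => exact absurd h (pvSplitP_ne_nil _ _)
  | cons a l => simp

-- the two token lists coincide
theorem pvTokens_eq (text : String) :
    ((pvSplitP pvIsSep (pvRDel text.toList)).map String.ofList).filterMap pvTokenOptB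
      = ((pvSplitP pvIsSep text.toList).map String.ofList).filterMap pvTokenOptB := by
  rw [List.filterMap_map, List.filterMap_map]
  have hg : (pvTokenOptB ∘ String.ofList) [] = none := by decide
  rw [pvFilterMap_filter_ne_nil _ hg, pvFilterMap_filter_ne_nil _ hg ((pvSplitP pvIsSep text.toList))]
  rw [(pvSplitP_rDel text.toList).2]

-- A's token fold over any line list is the pvAddT fold over the filterMapped tokens
theorem pvTk_filterMap (ls : List String) :
    pvTk [] (ls.filterMap pvCleanB) = (ls.filterMap pvTokenOptB).foldl pvAddT [] := by
  have h1 : ls.filterMap pvTokenOptB = (ls.filterMap pvCleanB).map pvTokenB := by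
    rw [show pvTokenOptB = (fun s => Option.map pvTokenB (pvCleanB s)) from funext pvTokenOptB_eq]
    rw [List.map_filterMap]
  rw [h1, List.foldl_map]
  rfl

-- ===== VERDICT (by name: the statement is the Claim_ definition above) =====
theorem hiddify_json_ui_parse_domains_v2_py_spec : Claim_equal_hiddify_json_ui_parse_domains_v2_py := by
  intro raw defaults _
  unfold Spec_hiddify_json_ui_parse_domains_v2_py
  unfold hiddify_json_ui_parse_domains_v2_py hiddify_json_ui_parse_domains_v2_py_alt pvLinesA
  simp only [pvA_lines_eq, pvA_tok_eq, pvLinesA_eq_split, pvSegsB_eq_split]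
  have hmain : pvTk [] (pvDd [] (List.filterMap pvCleanB
        (List.map String.ofList (pvSplitP pvIsSep (pvRDel (raw.getD "").toList)))))
      = pvFirstOcc (List.filterMap pvTokenOptB
        (List.map String.ofList (pvSplitP pvIsSep (raw.getD "").toList))) := by
    rw [pvTk_dedup, pvTk_filterMap, pvTokens_eq, pv_firstOcc_eq_fold]
  rw [hmain]
  have hdef : List.foldl
        (fun result item =>
          if result.contains ("domain:" ++ PySem.Str.replace (PySem.Str.lower (PySem.Str.strip item)) "domain:" "") = true then
            result
          else result ++ ["domain:" ++ PySem.Str.replace (PySem.Str.lower (PySem.Str.strip item)) "domain:" ""])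
        [] defaults
      = pvFirstOcc (List.map (fun d => "domain:" ++ PySem.Str.replace (PySem.Str.lower (PySem.Str.strip d)) "domain:" "") defaults) := by
    rw [← pv_firstOcc_eq_fold, List.foldl_map]
    simp only [pvAddT]
  by_cases hX : pvFirstOcc (List.filterMap pvTokenOptB
      (List.map String.ofList (pvSplitP pvIsSep (raw.getD "").toList))) = []
  · rw [if_pos (beq_iff_eq.mpr hX), if_neg (fun h => h hX), hX]
    exact hdef
  · rw [if_neg (fun h => hX (beq_iff_eq.mp h)), if_pos hX]
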